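-- pv_equiv track=rewrite | github.com/Iskandarrcode/LeetCode | 1446.py | takror
-- ===== SOURCE A (Python) =====
-- def takror(s):
--     count = 1
--     ls = list()
--     for i in range(len(s)):
--         for j in range(i + 1, len(s)):
--             if s[i] == s[i + 1]:
--                 if s[i] == s[j]:
--                     count += 1
--         if count > 1:
--             ls.append(count)
--             count = 1
--
--     return max(ls)
-- ===== SOURCE B (Python) =====
-- def takror(s):
--     total = {}
--     for ch in s:
--         total[ch] = total.get(ch, 0) + 1
--     seen = {}
--     best = None
--     for i, ch in enumerate(s):
--         if i + 1 < len(s) and s[i + 1] == ch: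
--             cand = total[ch] - seen.get(ch, 0)
--             if best is None or cand > best:
--                 best = cand
--         seen[ch] = seen.get(ch, 0) + 1
--     if best is None:
--         raise ValueError("no adjacent equal characters")
--     return best
-- ===== Notes on version B (the rewrite author's own statement) =====
-- stated objective: faster
-- what changed: Replaces A's per-position inner rescan of the rest of the string by a single pass that uses precomputed per-character totals and running prefix counts (suffix count = total - seen) with a running maximum.
import Mathlib
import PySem

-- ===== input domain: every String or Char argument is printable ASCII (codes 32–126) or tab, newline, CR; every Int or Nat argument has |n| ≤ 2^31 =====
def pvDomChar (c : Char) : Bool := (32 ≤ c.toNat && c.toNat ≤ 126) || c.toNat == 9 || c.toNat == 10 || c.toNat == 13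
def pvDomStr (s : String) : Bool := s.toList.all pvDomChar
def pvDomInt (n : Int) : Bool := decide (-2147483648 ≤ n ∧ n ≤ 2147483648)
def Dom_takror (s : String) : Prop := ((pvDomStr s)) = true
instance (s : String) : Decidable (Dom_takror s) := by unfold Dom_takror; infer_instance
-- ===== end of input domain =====

-- B replaces A's per-position inner rescans by a single pass over precomputed
-- per-character total/prefix counts (suffix count = total - seen), keeping a
-- running maximum (objective: faster).

-- ===== PORT A =====
-- inner 'for j in range(i+1, len(s))' loop of A
def takrorInner (cs : List Char) (i : Int) (count : Int) : Int :=
  (PySem.List.pyRange (i + 1) (cs.length : Int)).foldl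
    (fun c j =>
      if PySem.List.pyGet? cs i = PySem.List.pyGet? cs (i + 1) then
        if PySem.List.pyGet? cs i = PySem.List.pyGet? cs j then c + 1 else c
      else c) count

-- body of A's outer loop: state = (count, ls)
def takrorStep (cs : List Char) (st : Int × List Int) (i : Int) : Int × List Int :=
  let count := takrorInner cs i st.1
  if count > 1 then (1, st.2 ++ [count]) else (count, st.2)

def takror (s : String) : Int :=
  let cs := s.toList
  let st := (PySem.List.pyRange 0 (cs.length : Int)).foldl (takrorStep cs) (1, [])
  -- max(ls): Python raises ValueError on empty ls — excluded by Pre_takror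
  (PySem.List.max? st.2 (fun x => x)).getD 0

-- ===== PORT B =====
-- body of B's single enumerate loop: state = (seen, best)
def takrorAltStep (cs : List Char) (total : PySem.Dict Char Int)
    (st : PySem.Dict Char Int × Option Int) (p : Int × Char) :
    PySem.Dict Char Int × Option Int :=
  let best :=
    if p.1 + 1 < (cs.length : Int) ∧ PySem.List.pyGet? cs (p.1 + 1) = some p.2 then
      let cand := total.getD p.2 0 - st.1.getD p.2 0
      match st.2 with
      | none => some cand
      | some b => if cand > b then some cand else some b
    else st.2
  (st.1.modify p.2 0 (· + 1), best)

def takror_alt (s : String) : Int :=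
  let cs := s.toList
  let total := cs.foldl (fun (d : PySem.Dict Char Int) ch => d.modify ch 0 (· + 1)) PySem.Dict.empty
  let st := (PySem.List.enumerate cs).foldl (takrorAltStep cs total) (PySem.Dict.empty, none)
  -- 'if best is None: raise ValueError' — excluded by Pre_takror
  st.2.getD 0

-- ===== PRECONDITION & SPEC =====
-- Pre_ excludes exactly the strings with no pair of adjacent equal characters,
-- on which A raises ValueError (max of an empty list); B also raises ValueError there.
def Pre_takror (s : String) : Prop := ¬ s.toList.IsChain (· ≠ ·)
instance (s : String) : Decidable (Pre_takror s) := by unfold Pre_takror; infer_instance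

def pvWitness_takror : String := "abba"

def Spec_takror (s : String) (out : Int) : Prop := out = takror_alt s
instance (s : String) (out : Int) : Decidable (Spec_takror s out) := by unfold Spec_takror; infer_instance

-- ===== CLAIM (what is proved, stated in full; the proofs are below) =====
def Claim_equal_takror : Prop := ∀ (s : String), Dom_takror s → Pre_takror s → Spec_takror s (takror s)

-- ===== LEMMAS AND PROOFS =====

-- the list of values A appends to ls: for every adjacent equal pair, 1 + suffix count
def candList : List Char → List Int
  | [] => []
  | [_] => []
  | a :: b :: t => (if a = b then [1 + (((b :: t).count a : Nat) : Int)] else []) ++ candList (b :: t)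

-- B's running-maximum accumulation over the candidate list
def accMax : Option Int → List Int → Option Int
  | b, [] => b
  | b, x :: t =>
      accMax (match b with
              | none => some x
              | some b0 => if x > b0 then some x else some b0) t

lemma pyGet?_big (cs : List Char) (n : Nat) (h : cs.length ≤ n) :
    PySem.List.pyGet? cs (n : Int) = none := by
  simp [PySem.List.pyGet?, PySem.List.pyIdx?]
  omega

lemma cast_succ (i : Nat) : ((i : Int) + 1) = ((i + 1 : Nat) : Int) := by push_cast; ring

lemma pyGetCount (cs : List Char) (fuel : Nat) :
    ∀ (i : Nat), cs.length ≤ i + fuel → ∀ (c : Char),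
    (PySem.List.pyRange (i : Int) (cs.length : Int)).countP
      (fun j => decide (some c = PySem.List.pyGet? cs j)) = (cs.drop i).count c := by
  induction fuel with
  | zero =>
    intro i hle c
    rw [PySem.List.pyRange_one_eq_nil (by exact_mod_cast (by omega : cs.length ≤ i))]
    rw [List.drop_eq_nil_of_le (by omega)]
    simp
  | succ fuel ih =>
    intro i hle c
    rcases Nat.lt_or_ge i cs.length with h | h
    · rw [PySem.List.pyRange_one_cons (by exact_mod_cast h)]
      rw [List.countP_cons]
      rw [List.drop_eq_getElem_cons h, List.count_cons]
      rw [cast_succ, ih (i + 1) (by omega) c]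
      rw [PySem.List.pyGet?_ofNat cs i h]
      by_cases hc : c = cs[i]
      · simp [hc]
      · have h2 : ¬(cs[i] = c) := fun h' => hc h'.symm
        simp [hc, h2]
    · rw [PySem.List.pyRange_one_eq_nil (by exact_mod_cast h)]
      rw [List.drop_eq_nil_of_le h]
      simp

lemma inner_eval (cs : List Char) (i : Nat) (hi : i < cs.length) (cnt : Int) :
    takrorInner cs (i : Int) cnt =
      if PySem.List.pyGet? cs (i : Int) = PySem.List.pyGet? cs ((i : Int) + 1)
      then cnt + (((cs.drop (i + 1)).count cs[i] : Nat) : Int) else cnt := by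
  unfold takrorInner
  by_cases hC : PySem.List.pyGet? cs (i : Int) = PySem.List.pyGet? cs ((i : Int) + 1)
  · rw [if_pos hC]
    rw [PySem.List.foldl_congr_mem _ _
      (fun c j => if PySem.List.pyGet? cs (i : Int) = PySem.List.pyGet? cs j then c + 1 else c) _
      (by intro acc x hx; simp [hC])]
    rw [PySem.List.foldl_ite_add_one (fun j => PySem.List.pyGet? cs (i : Int) = PySem.List.pyGet? cs j)]
    simp only [PySem.List.pyGet?_ofNat cs i hi]
    rw [cast_succ, pyGetCount cs cs.length (i + 1) (by omega) cs[i]]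
  · rw [if_neg hC]
    rw [PySem.List.foldl_congr_mem _ _ (fun c _ => c) _ (by intro acc x hx; rw [if_neg hC]),
      PySem.List.foldl_ignore]

lemma candList_drop (cs : List Char) (i : Nat) (h : i < cs.length) :
    candList (cs.drop i) =
      (if PySem.List.pyGet? cs (i : Int) = PySem.List.pyGet? cs ((i : Int) + 1)
       then [1 + (((cs.drop (i + 1)).count cs[i] : Nat) : Int)] else []) ++ candList (cs.drop (i + 1)) := by
  rw [cast_succ]
  rcases Nat.lt_or_ge (i + 1) cs.length with h2 | h2
  · rw [List.drop_eq_getElem_cons h, List.drop_eq_getElem_cons h2]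
    rw [PySem.List.pyGet?_ofNat cs i h, PySem.List.pyGet?_ofNat cs (i + 1) h2]
    simp only [candList, Option.some_inj]
  · rw [PySem.List.pyGet?_ofNat cs i h, pyGet?_big cs (i + 1) h2]
    rw [List.drop_eq_getElem_cons h, List.drop_eq_nil_of_le h2]
    simp [candList]

lemma loopA (cs : List Char) (fuel : Nat) :
    ∀ (i : Nat), cs.length ≤ i + fuel → ∀ (ls : List Int),
    (PySem.List.pyRange (i : Int) (cs.length : Int)).foldl (takrorStep cs) (1, ls)
      = (1, ls ++ candList (cs.drop i)) := by
  induction fuel with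
  | zero =>
    intro i hle ls
    rw [PySem.List.pyRange_one_eq_nil (by exact_mod_cast (by omega : cs.length ≤ i)),
      List.drop_eq_nil_of_le (by omega)]
    simp [candList]
  | succ fuel ih =>
    intro i hle ls
    rcases Nat.lt_or_ge i cs.length with h | h
    · rw [PySem.List.pyRange_one_cons (by exact_mod_cast h), List.foldl_cons]
      have hstep : takrorStep cs (1, ls) (i : Int) =
          if PySem.List.pyGet? cs (i : Int) = PySem.List.pyGet? cs ((i : Int) + 1)
          then (1, ls ++ [1 + (((cs.drop (i + 1)).count cs[i] : Nat) : Int)])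
          else (1, ls) := by
        unfold takrorStep
        rw [inner_eval cs i h 1]
        by_cases hC : PySem.List.pyGet? cs (i : Int) = PySem.List.pyGet? cs ((i : Int) + 1)
        · rw [if_pos hC, if_pos hC]
          have h2 : i + 1 < cs.length := by
            by_contra hc
            rw [PySem.List.pyGet?_ofNat cs i h, cast_succ, pyGet?_big cs (i + 1) (by omega)] at hC
            simp at hC
          have heq : cs[i + 1] = cs[i] := by
            rw [PySem.List.pyGet?_ofNat cs i h, cast_succ, PySem.List.pyGet?_ofNat cs (i + 1) h2] at hC
            exact (Option.some_inj.mp hC).symm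
          have hmem : 1 ≤ (cs.drop (i + 1)).count cs[i] := by
            rw [List.drop_eq_getElem_cons h2, heq, List.count_cons_self]
            omega
          rw [if_pos (by omega)]
        · rw [if_neg hC, if_neg hC, if_neg (by omega)]
      rw [hstep]
      by_cases hC : PySem.List.pyGet? cs (i : Int) = PySem.List.pyGet? cs ((i : Int) + 1)
      · rw [if_pos hC, cast_succ, ih (i + 1) (by omega), candList_drop cs i h, if_pos hC]
        simp
      · rw [if_neg hC, cast_succ, ih (i + 1) (by omega), candList_drop cs i h, if_neg hC]
        simp
    · rw [PySem.List.pyRange_one_eq_nil (by exact_mod_cast h), List.drop_eq_nil_of_le h]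
      simp [candList]

lemma eqA (s : String) :
    takror s = (PySem.List.max? (candList s.toList) (fun x => x)).getD 0 := by
  unfold takror
  dsimp only
  rw [show ((0:Int)) = (((0:Nat)):Int) by norm_num,
    loopA s.toList s.toList.length 0 (by omega) []]
  simp

lemma count_take_drop (cs : List Char) (i : Nat) (c : Char) :
    cs.count c = (cs.take i).count c + (cs.drop i).count c := by
  conv_lhs => rw [← List.take_append_drop i cs]
  rw [List.count_append]

lemma seen_update (seen : PySem.Dict Char Int) (x : Char) (c : Char) :
    (seen.modify x 0 (· + 1)).getD c 0 = seen.getD c 0 + if x = c then 1 else 0 := by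
  have h := PySem.Dict.getD_foldl_modify_add_one [x] seen c
  simp only [List.foldl_cons, List.foldl_nil] at h
  rw [h, List.count_cons, List.count_nil]
  by_cases hx : x = c <;> simp [hx]

lemma loopB (cs : List Char) (total : PySem.Dict Char Int)
    (htotal : ∀ c, total.getD c 0 = (cs.count c : Int)) (fuel : Nat) :
    ∀ (i : Nat), cs.length ≤ i + fuel →
    ∀ (seen : PySem.Dict Char Int) (best : Option Int),
    (∀ c, seen.getD c 0 = ((cs.take i).count c : Int)) →
    ((PySem.List.enumerate (cs.drop i) (i : Int)).foldl (takrorAltStep cs total) (seen, best)).2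
      = accMax best (candList (cs.drop i)) := by
  induction fuel with
  | zero =>
    intro i hle seen best hseen
    rw [List.drop_eq_nil_of_le (by omega), PySem.List.enumerate_nil]
    simp [accMax, candList]
  | succ fuel ih =>
    intro i hle seen best hseen
    rcases Nat.lt_or_ge i cs.length with h | h
    · rw [List.drop_eq_getElem_cons h, PySem.List.enumerate_cons, List.foldl_cons]
      rw [← List.drop_eq_getElem_cons h]
      have hstep : takrorAltStep cs total (seen, best) ((i : Int), cs[i]) =
          (seen.modify cs[i] 0 (· + 1),
           if PySem.List.pyGet? cs ((i : Int) + 1) = some cs[i] then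
             (match best with
              | none => some (((cs.drop i).count cs[i] : Nat) : Int)
              | some b => if (((cs.drop i).count cs[i] : Nat) : Int) > b
                          then some (((cs.drop i).count cs[i] : Nat) : Int) else some b)
           else best) := by
        unfold takrorAltStep
        dsimp only
        by_cases hC : PySem.List.pyGet? cs ((i : Int) + 1) = some cs[i]
        · have h2 : i + 1 < cs.length := by
            by_contra hc
            rw [cast_succ, pyGet?_big cs (i + 1) (by omega)] at hC
            simp at hC
          rw [if_pos ⟨by exact_mod_cast h2, hC⟩, if_pos hC]
          have hcand : total.getD cs[i] 0 - seen.getD cs[i] 0 = (((cs.drop i).count cs[i] : Nat) : Int) := by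
            rw [htotal, hseen, count_take_drop cs i cs[i]]
            push_cast
            ring
          rw [hcand]
        · rw [if_neg (by rintro ⟨-, hc⟩; exact hC hc), if_neg hC]
      rw [hstep, cast_succ i]
      have hseen' : ∀ c, (seen.modify cs[i] 0 (· + 1)).getD c 0 = ((cs.take (i + 1)).count c : Int) := by
        intro c
        rw [seen_update, hseen, List.take_succ_eq_append_getElem h, List.count_append,
          List.count_cons, List.count_nil]
        by_cases hx : cs[i] = c <;> simp [hx]
      rw [ih (i + 1) (by omega) _ _ hseen']
      rw [candList_drop cs i h]
      by_cases hC : PySem.List.pyGet? cs (((i + 1 : Nat)) : Int) = some cs[i]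
      · have hCC : PySem.List.pyGet? cs (i : Int) = PySem.List.pyGet? cs ((i : Int) + 1) := by
          rw [PySem.List.pyGet?_ofNat cs i h, cast_succ i, hC]
        rw [if_pos hC, if_pos hCC]
        have hd : (cs.drop i).count cs[i] = 1 + (cs.drop (i + 1)).count cs[i] := by
          rw [List.drop_eq_getElem_cons h, List.count_cons_self]
          omega
        rw [hd]
        cases best <;> simp [accMax]
      · have hCC : ¬ (PySem.List.pyGet? cs (i : Int) = PySem.List.pyGet? cs ((i : Int) + 1)) := by
          rw [PySem.List.pyGet?_ofNat cs i h, cast_succ i]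
          exact fun hc => hC hc.symm
        rw [if_neg hC, if_neg hCC]
        simp
    · rw [List.drop_eq_nil_of_le h, PySem.List.enumerate_nil]
      simp [accMax, candList]

lemma eqB (s : String) :
    takror_alt s = (accMax none (candList s.toList)).getD 0 := by
  unfold takror_alt
  dsimp only
  have htotal : ∀ c, (s.toList.foldl (fun (d : PySem.Dict Char Int) ch => d.modify ch 0 (· + 1))
      PySem.Dict.empty).getD c 0 = (s.toList.count c : Int) := by
    intro c
    rw [← PySem.Dict.counter_eq_foldl, PySem.Dict.getD_counter]
  have h0 : PySem.List.enumerate s.toList = PySem.List.enumerate (s.toList.drop 0) ((0 : Nat) : Int) := by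
    simp
  rw [h0, loopB s.toList _ htotal s.toList.length 0 (by omega) _ none (by simp)]
  simp

lemma accMax_some (t : List Int) : ∀ (b : Int), accMax (some b) t = some (t.foldl max b) := by
  induction t with
  | nil => intro b; simp [accMax]
  | cons x t ih =>
    intro b
    simp only [accMax, List.foldl_cons]
    by_cases h : x > b
    · rw [if_pos h, ih, max_eq_right (by omega)]
    · rw [if_neg h, ih, max_eq_left (by omega)]

lemma accMax_getD (l : List Int) :
    (accMax none l).getD 0 = ((PySem.List.max? l (fun x => x)).getD 0) := by
  cases l with
  | nil => simp [accMax, PySem.List.max?]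
  | cons x t =>
    rw [PySem.List.max?_id_cons]
    simp only [accMax]
    rw [accMax_some]

-- ===== VERDICT (by name: the statement is the Claim_ definition above) =====
theorem takror_spec : Claim_equal_takror := by
  intro s _ _
  unfold Spec_takror
  rw [eqA, eqB, accMax_getD]
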